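-- pv_equiv track=rewrite | github.com/sushant-206/codecn | Assignment 8/subnet.py | get_ip_and_subnet_mask
-- ===== SOURCE A (Python) =====
-- ip_subnet_map = {
--     "A":[0,127,"255.0.0.0"],
--     "B":[128,191,"255.255.0.0"],
--     "C":[192,223,"255.255.255.0"],
--     "D":[224,239,"255.255.0.0"],
--     "E":[240,255,"255.255.0.0"],
-- }
--
-- def get_ip_and_subnet_mask(first_octet:int):
--     subnet_mask = None
--     ip_class = None
--
--     for k,v in ip_subnet_map.items():
--         if(v[0] <= first_octet <= v[1]):
--             subnet_mask = v[2]
--             ip_class = k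
--             return subnet_mask,ip_class
--
--     return None,None
-- ===== SOURCE B (Python) =====
-- def get_ip_and_subnet_mask(first_octet: int):
--     # Classful addressing: the class is the count of leading 1-bits (capped at 4)
--     # in the 8-bit first octet; the mask follows from that index.
--     if not 0 <= first_octet <= 255:
--         return None, None
--     i = 0
--     while i < 4 and first_octet & (128 >> i):
--         i += 1
--     masks = ["255.0.0.0", "255.255.0.0", "255.255.255.0", "255.255.0.0", "255.255.0.0"]
--     return masks[i], "ABCDE"[i]
-- ===== Notes on version B (the rewrite author's own statement) =====
-- stated objective: alternative
-- what changed: Instead of scanning a table of [lo,hi,mask] ranges, B uses the classful-addressing bit structure: it counts the leading one-bits of the eight-bit octet (capped at four) and indexes the mask and class letter by that count.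
import Mathlib
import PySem

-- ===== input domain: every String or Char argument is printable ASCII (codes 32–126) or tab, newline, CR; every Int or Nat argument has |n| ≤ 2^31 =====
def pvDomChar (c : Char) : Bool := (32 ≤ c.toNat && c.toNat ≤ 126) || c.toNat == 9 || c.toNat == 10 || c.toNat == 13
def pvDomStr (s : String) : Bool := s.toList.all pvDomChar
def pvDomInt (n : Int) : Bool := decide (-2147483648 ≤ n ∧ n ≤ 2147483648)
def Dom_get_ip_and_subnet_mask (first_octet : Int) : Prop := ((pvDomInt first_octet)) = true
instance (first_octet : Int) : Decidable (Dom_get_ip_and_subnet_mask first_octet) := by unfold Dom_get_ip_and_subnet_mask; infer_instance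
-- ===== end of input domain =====

-- B replaces A's scan over a dict of [lo,hi,mask] ranges by the classful-addressing bit rule:
-- the class index is the count of leading one-bits of the octet (capped), used to index masks and letters.

-- ===== PORT A =====
-- the module-level dict ip_subnet_map, in insertion order (class ↦ (lo, hi, mask))
def ip_subnet_map : List (String × (Int × Int × String)) :=
  [("A", (0, 127, "255.0.0.0")),
   ("B", (128, 191, "255.255.0.0")),
   ("C", (192, 223, "255.255.255.0")),
   ("D", (224, 239, "255.255.0.0")),
   ("E", (240, 255, "255.255.0.0"))]

-- the for-loop with early return: first matching entry, else (None, None)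
def pvScan (first_octet : Int) : List (String × (Int × Int × String)) → Option String × Option String
  | [] => (none, none)
  | (k, (lo, hi, mask)) :: rest =>
      if lo ≤ first_octet ∧ first_octet ≤ hi then (some mask, some k)
      else pvScan first_octet rest

def get_ip_and_subnet_mask (first_octet : Int) : Option String × Option String :=
  pvScan first_octet ip_subnet_map

-- ===== PORT B =====
-- the while loop 'while i < 4 and first_octet & (128 >> i): i += 1', with fuel = 4 - i
def pvLeadOnes (n : Int) : Nat → Nat → Nat
  | 0, i => i
  | fuel + 1, i => if PySem.Int.band n ((128 : Int) >>> i) ≠ 0 then pvLeadOnes n fuel (i + 1) else i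

def get_ip_and_subnet_mask_alt (first_octet : Int) : Option String × Option String :=
  if ¬ (0 ≤ first_octet ∧ first_octet ≤ 255) then (none, none)
  else
    let i := pvLeadOnes first_octet 4 0
    let masks := ["255.0.0.0", "255.255.0.0", "255.255.255.0", "255.255.0.0", "255.255.0.0"]
    -- "ABCDE"[i] yields a one-character string: Str.pyGet? gives the Char, wrapped back into a String
    (PySem.List.pyGet? masks (i : Int), (PySem.Str.pyGet? "ABCDE" (i : Int)).map (fun c => String.ofList [c]))

-- ===== PRECONDITION & SPEC =====
def Spec_get_ip_and_subnet_mask (first_octet : Int) (out : Option String × Option String) : Prop := out = get_ip_and_subnet_mask_alt first_octet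
instance (first_octet : Int) (out : Option String × Option String) : Decidable (Spec_get_ip_and_subnet_mask first_octet out) := by unfold Spec_get_ip_and_subnet_mask; infer_instance

-- ===== CLAIM (what is proved, stated in full; the proofs are below) =====
def Claim_equal_get_ip_and_subnet_mask : Prop := ∀ (first_octet : Int), Dom_get_ip_and_subnet_mask first_octet → Spec_get_ip_and_subnet_mask first_octet (get_ip_and_subnet_mask first_octet)

-- ===== LEMMAS AND PROOFS =====

-- ===== VERDICT (by name: the statement is the Claim_ definition above) =====
theorem get_ip_and_subnet_mask_spec : Claim_equal_get_ip_and_subnet_mask := by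
  intro n _
  unfold Spec_get_ip_and_subnet_mask
  by_cases h : 0 ≤ n ∧ n ≤ 255
  · obtain ⟨h1, h2⟩ := h
    interval_cases n <;> decide
  · unfold get_ip_and_subnet_mask get_ip_and_subnet_mask_alt ip_subnet_map
    simp only [pvScan]
    split_ifs <;> first | rfl | omega
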